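-- pv_equiv track=rewrite | github.com/dancooper37/bioinformatics | rosalind/stronghold/fib.py | rabbits
-- ===== SOURCE A (Python) =====
-- def rabbits(n, k):
--     if n == 1:
--         return 1
--     elif n == 2:
--         return k
--
--     oneGen = rabbits(n - 1, k)
--     twoGen = rabbits(n - 2, k)
--
--     if n <= 4:
--         return oneGen + twoGen
--     return oneGen + (twoGen * k)
-- ===== SOURCE B (Python) =====
-- def rabbits(n, k):
--     if n == 1:
--         return 1
--     prev, cur = 1, k
--     for i in range(3, n + 1):
--         prev, cur = cur, cur + prev * (1 if i <= 4 else k)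
--     return cur
-- ===== Notes on version B (the rewrite author's own statement) =====
-- stated objective: faster
-- what changed: Replaces the naive binary recursion with a bottom-up loop keeping only the previous two terms (applying the factor 1 for generations <= 4 and k afterwards, like A).
import Mathlib
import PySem

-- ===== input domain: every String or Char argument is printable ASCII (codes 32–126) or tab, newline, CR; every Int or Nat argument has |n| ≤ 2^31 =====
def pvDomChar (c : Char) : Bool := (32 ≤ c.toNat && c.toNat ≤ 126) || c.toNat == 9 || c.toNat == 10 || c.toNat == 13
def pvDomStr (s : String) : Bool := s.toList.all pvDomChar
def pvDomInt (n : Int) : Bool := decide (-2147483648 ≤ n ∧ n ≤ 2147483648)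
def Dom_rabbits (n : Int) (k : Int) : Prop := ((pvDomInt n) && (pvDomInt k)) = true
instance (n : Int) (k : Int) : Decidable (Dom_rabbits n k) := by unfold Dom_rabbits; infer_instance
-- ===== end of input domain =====

-- B replaces A's exponential binary recursion by a bottom-up O(n) loop keeping the
-- previous two terms (same n<=4 rule). Return-value equivalence on n >= 1.

-- ===== PORT A =====
-- fuel = n.toNat recursion depth; fuel is never exhausted when 1 ≤ n (Pre_), so this
-- is a literal transcription of A's recursion on its domain.
def rabbitsF : Nat → Int → Int → Int
  | 0, _, _ => 0
  | f + 1, n, k =>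
    if n = 1 then 1
    else if n = 2 then k
    else
      let oneGen := rabbitsF f (n - 1) k
      let twoGen := rabbitsF f (n - 2) k
      if n ≤ 4 then oneGen + twoGen else oneGen + twoGen * k

def rabbits (n : Int) (k : Int) : Int := rabbitsF n.toNat n k

-- ===== PORT B =====
def rabbits_alt (n : Int) (k : Int) : Int :=
  if n = 1 then 1
  else
    let pc := (PySem.List.pyRange 3 (n + 1) 1).foldl
      (fun (pc : Int × Int) i => (pc.2, pc.2 + pc.1 * (if i ≤ 4 then 1 else k))) (1, k)
    pc.2

-- ===== PRECONDITION & SPEC =====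
-- Pre_ excludes n ≤ 0, on which Python A recurses without a base case (RecursionError).
def Pre_rabbits (n : Int) (_k : Int) : Prop := 1 ≤ n
instance (n : Int) (k : Int) : Decidable (Pre_rabbits n k) := by unfold Pre_rabbits; infer_instance
def pvWitness_rabbits : Int × Int := (5, 3)

def Spec_rabbits (n : Int) (k : Int) (out : Int) : Prop := out = rabbits_alt n k
instance (n : Int) (k : Int) (out : Int) : Decidable (Spec_rabbits n k out) := by unfold Spec_rabbits; infer_instance

-- ===== CLAIM (what is proved, stated in full; the proofs are below) =====
def Claim_equal_rabbits : Prop := ∀ (n : Int) (k : Int), Dom_rabbits n k → Pre_rabbits n k → Spec_rabbits n k (rabbits n k)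

-- ===== LEMMAS AND PROOFS =====

-- fuel irrelevance: any fuel ≥ n.toNat gives the same value (for 1 ≤ n).
theorem rabbitsF_fuel (f g : Nat) (n k : Int) (hn : 1 ≤ n) (hf : n.toNat ≤ f) (hg : n.toNat ≤ g) :
    rabbitsF f n k = rabbitsF g n k := by
  induction f using Nat.strong_induction_on generalizing g n with
  | _ f ih =>
    match f, g with
    | 0, _ => exact absurd hf (by omega)
    | _ + 1, 0 => exact absurd hg (by omega)
    | f' + 1, g' + 1 =>
      simp only [rabbitsF]
      by_cases h1 : n = 1
      · simp [h1]
      · by_cases h2 : n = 2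
        · simp [h2]
        · have hn3 : 3 ≤ n := by omega
          have e1 : rabbitsF f' (n - 1) k = rabbitsF g' (n - 1) k := by
            apply ih f' (Nat.lt_succ_self f') <;> omega
          have e2 : rabbitsF f' (n - 2) k = rabbitsF g' (n - 2) k := by
            apply ih f' (Nat.lt_succ_self f') <;> omega
          simp [h1, h2, e1, e2]

theorem rabbits_one (k : Int) : rabbits 1 k = 1 := by
  simp [rabbits, rabbitsF]

theorem rabbits_two (k : Int) : rabbits 2 k = k := by
  simp [rabbits, rabbitsF]

-- the recurrence A satisfies for n ≥ 3
theorem rabbits_rec (n k : Int) (hn : 3 ≤ n) :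
    rabbits n k = rabbits (n - 1) k + rabbits (n - 2) k * (if n ≤ 4 then 1 else k) := by
  have h : n.toNat = (n.toNat - 1) + 1 := by omega
  unfold rabbits
  rw [h]
  simp only [rabbitsF]
  have h1 : ¬ n = 1 := by omega
  have h2 : ¬ n = 2 := by omega
  have e1 : rabbitsF (n.toNat - 1) (n - 1) k = rabbitsF (n - 1).toNat (n - 1) k :=
    rabbitsF_fuel _ _ _ _ (by omega) (by omega) (by omega)
  have e2 : rabbitsF (n.toNat - 1) (n - 2) k = rabbitsF (n - 2).toNat (n - 2) k :=
    rabbitsF_fuel _ _ _ _ (by omega) (by omega) (by omega)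
  by_cases h4 : n ≤ 4 <;> simp [h1, h2, h4, e1, e2]

-- the loop invariant: after folding range(3, n+1) the pair is (A(n-1), A(n)) for n ≥ 2
theorem fold_invariant (k : Int) (m : Nat) :
    ((PySem.List.pyRange 3 ((2 + (m : Int)) + 1) 1).foldl
      (fun (pc : Int × Int) i => (pc.2, pc.2 + pc.1 * (if i ≤ 4 then 1 else k))) (1, k))
    = (rabbits ((2 + (m : Int)) - 1) k, rabbits (2 + (m : Int)) k) := by
  induction m with
  | zero =>
    rw [PySem.List.pyRange_one_eq_nil (by omega)]
    simp only [List.foldl]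
    norm_num [rabbits_one, rabbits_two]
  | succ m ih =>
    have hb : (2 + ((m : Int) + 1)) + 1 = ((2 + (m : Int) + 1) + 1) := by push_cast; ring
    rw [Nat.cast_add, Nat.cast_one, hb,
      PySem.List.pyRange_one_succ_right (by omega), List.foldl_append]
    push_cast at ih
    rw [ih]
    simp only [List.foldl]
    have hr := rabbits_rec (2 + (m : Int) + 1) k (by omega)
    have e1 : 2 + (m : Int) + 1 - 1 = 2 + (m : Int) := by ring
    have e2 : 2 + (m : Int) + 1 - 2 = 2 + (m : Int) - 1 := by ring
    rw [e1, e2] at hr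
    have e3 : 2 + ((m : Int) + 1) - 1 = 2 + (m : Int) := by ring
    have e4 : (2 : Int) + ((m : Int) + 1) = 2 + (m : Int) + 1 := by ring
    rw [e3, e4, hr]

-- ===== VERDICT (by name: the statement is the Claim_ definition above) =====
theorem rabbits_spec : Claim_equal_rabbits := by
  intro n k _ hpre
  unfold Spec_rabbits rabbits_alt
  by_cases h1 : n = 1
  · simp [h1, rabbits_one]
  · simp only [h1, if_false]
    have h2 : 2 ≤ n := by unfold Pre_rabbits at hpre; omega
    obtain ⟨m, hm⟩ : ∃ m : Nat, n = 2 + (m : Int) := ⟨(n - 2).toNat, by omega⟩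
    subst hm
    rw [fold_invariant]
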